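-- pv_equiv track=rewrite | github.com/jco221/code_in_place_final_project | hangman.py | add_space
-- ===== SOURCE A (Python) =====
-- ALPHABET = "ABCDEFGHIJKLMNOPQRSTUVWXYZ"
--
-- def add_space(chosen_word):
--     """Function adds space in between the letters"""
--     chosen_word_with_space = ""
--     for i in range(len(chosen_word)):
--         letter = chosen_word[i]
--         if letter in ALPHABET:
--             chosen_word_with_space += (letter + " ")
--         else:
--             chosen_word_with_space += letter
--     return chosen_word_with_space
-- ===== SOURCE B (Python) =====
-- ALPHABET = "ABCDEFGHIJKLMNOPQRSTUVWXYZ"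
--
-- def add_space(chosen_word):
--     """Split the word into segments cut right after each uppercase letter,
--     then join the segments with a single space."""
--     cuts = [i + 1 for i, ch in enumerate(chosen_word) if ch in ALPHABET]
--     pieces = [chosen_word[a:b] for a, b in zip([0] + cuts, cuts + [len(chosen_word)])]
--     return " ".join(pieces)
-- ===== Notes on version B (the rewrite author's own statement) =====
-- stated objective: alternative
-- what changed: Instead of A's per-character scan that grows the result with += concatenation, B first computes the list of cut positions right after each uppercase letter, then slices the word at those positions and joins the segments with a single space.
import Mathlib
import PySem

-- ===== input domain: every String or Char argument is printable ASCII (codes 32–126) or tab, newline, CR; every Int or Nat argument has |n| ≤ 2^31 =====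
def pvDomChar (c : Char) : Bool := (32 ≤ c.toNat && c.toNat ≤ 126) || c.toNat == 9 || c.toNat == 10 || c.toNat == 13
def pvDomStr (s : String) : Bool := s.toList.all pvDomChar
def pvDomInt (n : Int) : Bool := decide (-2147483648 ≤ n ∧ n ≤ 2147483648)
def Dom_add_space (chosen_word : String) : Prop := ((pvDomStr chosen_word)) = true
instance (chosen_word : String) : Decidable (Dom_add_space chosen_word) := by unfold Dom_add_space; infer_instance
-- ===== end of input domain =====

-- B replaces A's per-character scan with += concatenation by a staged slice-and-join algorithm:
-- collect the cut positions right after each uppercase letter, slice the word at those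
-- positions, and join the segments with a single space.

-- ===== PORT A =====
def pvALPHABET : List Char := "ABCDEFGHIJKLMNOPQRSTUVWXYZ".toList

-- literal port of A's index loop; 'letter in ALPHABET' on a single char is membership
def add_space (chosen_word : String) : String :=
  String.ofList ((PySem.List.pyRange 0 (chosen_word.toList.length : Int) 1).foldl (fun acc i =>
    if pvALPHABET.contains (PySem.List.pyGetD chosen_word.toList i ' ')
    then acc ++ [PySem.List.pyGetD chosen_word.toList i ' ', ' ']
    else acc ++ [PySem.List.pyGetD chosen_word.toList i ' ']) [])

-- ===== PORT B =====
-- cuts = [i + 1 for i, ch in enumerate(chosen_word) if ch in ALPHABET]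
def pvCuts (l : List Char) : List Int :=
  (PySem.List.enumerate l).filterMap (fun p => if pvALPHABET.contains p.2 then some (p.1 + 1) else none)

-- pieces = [chosen_word[a:b] for a, b in zip([0] + cuts, cuts + [len(chosen_word)])]; return " ".join(pieces)
def add_space_alt (chosen_word : String) : String :=
  String.ofList (PySem.Chars.join [' ']
    (((0 :: pvCuts chosen_word.toList).zip (pvCuts chosen_word.toList ++ [(chosen_word.toList.length : Int)])).map
      (fun p => PySem.List.slice chosen_word.toList (some p.1) (some p.2))))

-- ===== PRECONDITION & SPEC =====
def Spec_add_space (chosen_word : String) (out : String) : Prop := out = add_space_alt chosen_word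
instance (chosen_word : String) (out : String) : Decidable (Spec_add_space chosen_word out) := by unfold Spec_add_space; infer_instance

-- ===== CLAIM (what is proved, stated in full; the proofs are below) =====
def Claim_equal_add_space : Prop := ∀ (chosen_word : String), Dom_add_space chosen_word → Spec_add_space chosen_word (add_space chosen_word)

-- ===== LEMMAS AND PROOFS =====

-- the common per-character expansion both programs compute
def pvF (c : Char) : List Char := if pvALPHABET.contains c then [c, ' '] else [c]

-- B's pieces list, named for the proofs (exactly the expression inside add_space_alt)
def pvPieces (l : List Char) : List (List Char) :=
  ((0 :: pvCuts l).zip (pvCuts l ++ [(l.length : Int)])).map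
    (fun p => PySem.List.slice l (some p.1) (some p.2))

-- shifting the enumerate start shifts every cut
theorem pv_cuts_shift (l : List Char) : ∀ s : Int,
    (PySem.List.enumerate l s).filterMap (fun p => if pvALPHABET.contains p.2 then some (p.1 + 1) else none)
      = (pvCuts l).map (· + s) := by
  induction l with
  | nil => intro s; simp [pvCuts]
  | cons c l ih =>
    intro s
    have h01 : (0 : Int) + 1 = 1 := by norm_num
    simp only [pvCuts, PySem.List.enumerate_cons, List.filterMap_cons, h01]
    rw [ih (s + 1), ih 1]
    cases hu : pvALPHABET.contains c
    · simp only [Bool.false_eq_true, reduceIte, List.map_map]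
      apply List.map_congr_left; intro k _; simp; omega
    · simp only [reduceIte, List.map_cons, List.map_map]
      refine List.cons_eq_cons.mpr ⟨by omega, ?_⟩
      apply List.map_congr_left; intro k _; simp; omega

theorem pv_cuts_cons (c : Char) (l : List Char) :
    pvCuts (c :: l) = (if pvALPHABET.contains c then [1] else []) ++ (pvCuts l).map (· + 1) := by
  have h01 : (0 : Int) + 1 = 1 := by norm_num
  conv_lhs => rw [pvCuts, PySem.List.enumerate_cons, List.filterMap_cons, h01, pv_cuts_shift l 1]
  cases hu : pvALPHABET.contains c <;> simp

-- every cut position is at least 1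
theorem pv_cuts_pos (l : List Char) : ∀ k ∈ pvCuts l, 1 ≤ k := by
  induction l with
  | nil => simp [pvCuts]
  | cons c l ih =>
    intro k hk
    rw [pv_cuts_cons] at hk
    rcases List.mem_append.mp hk with h | h
    · split_ifs at h <;> simp_all
    · obtain ⟨j, hj, rfl⟩ := List.mem_map.mp h
      have := ih j hj; omega

-- " ".join((c::p)::t) = c :: " ".join(p::t)
theorem pv_join_cons_head (c : Char) (p : List Char) (t : List (List Char)) :
    PySem.Chars.join [' '] ((c :: p) :: t) = c :: PySem.Chars.join [' '] (p :: t) := by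
  cases t with
  | nil => simp [PySem.Chars.join, List.intercalate]
  | cons q t => rw [PySem.Chars.join_cons_cons, PySem.Chars.join_cons_cons]; simp

-- slicing the tail: (c::l)[a+1:b+1] is l[a:b]  (nonnegative bounds)
theorem pv_slice_shift (c : Char) (l : List Char) {a b : Int} (ha : 0 ≤ a) (hb : 0 ≤ b) :
    PySem.List.slice (c :: l) (some (a + 1)) (some (b + 1)) = PySem.List.slice l (some a) (some b) := by
  rw [PySem.List.slice_toNat _ (by omega) (by omega), PySem.List.slice_toNat _ ha hb]
  have h1 : (a + 1).toNat = a.toNat + 1 := by omega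
  rw [h1]
  have h2 : (b + 1).toNat - (a.toNat + 1) = b.toNat - a.toNat := by omega
  rw [h2, List.drop_succ_cons]

-- a map of shifted slices over c::l is the map of the unshifted slices over l
theorem pv_map_slice_shift (c : Char) (l : List Char) (Z : List (Int × Int))
    (h : ∀ p ∈ Z, 0 ≤ p.1 ∧ 0 ≤ p.2) :
    (Z.map (Prod.map (· + 1) (· + 1))).map (fun p => PySem.List.slice (c :: l) (some p.1) (some p.2))
      = Z.map (fun p => PySem.List.slice l (some p.1) (some p.2)) := by
  rw [List.map_map]
  apply List.map_congr_left
  intro p hp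
  simp only [Function.comp, Prod.map]
  exact pv_slice_shift c l (h p hp).1 (h p hp).2

-- (c::l)[0:b+1] = c :: l[0:b]  for 0 ≤ b
theorem pv_slice_zero_succ (c : Char) (l : List Char) {b : Int} (hb : 0 ≤ b) :
    PySem.List.slice (c :: l) (some 0) (some (b + 1)) = c :: PySem.List.slice l (some 0) (some b) := by
  rw [PySem.List.slice_toNat _ le_rfl (by omega), PySem.List.slice_toNat _ le_rfl hb]
  have h1 : (b + 1).toNat - (0 : Int).toNat = b.toNat + 1 := by omega
  have h2 : b.toNat - (0 : Int).toNat = b.toNat := by omega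
  rw [h1, h2]
  simp [List.take_succ_cons]

-- uppercase head: the head becomes its own one-letter piece
theorem pv_pieces_cons_upper (c : Char) (l : List Char) (hu : pvALPHABET.contains c = true) :
    pvPieces (c :: l) = [c] :: pvPieces l := by
  unfold pvPieces
  have hn : ((c :: l).length : Int) = (l.length : Int) + 1 := by push_cast [List.length_cons]; ring
  rw [pv_cuts_cons, if_pos hu, hn]
  have e1 : (1 : Int) :: (pvCuts l).map (· + 1) = (0 :: pvCuts l).map (· + 1) := by simp
  have e2 : (pvCuts l).map (· + 1) ++ [(l.length : Int) + 1]
      = (pvCuts l ++ [(l.length : Int)]).map (· + 1) := by simp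
  simp only [List.cons_append, List.nil_append, List.zip_cons_cons, List.map_cons]
  rw [e1, e2, List.zip_map]
  refine List.cons_eq_cons.mpr ⟨?_, ?_⟩
  · rw [PySem.List.slice_toNat _ le_rfl (by omega)]; rfl
  · apply pv_map_slice_shift
    intro p hp
    obtain ⟨h1, h2⟩ := List.of_mem_zip hp
    constructor
    · rcases List.mem_cons.mp h1 with h1 | h1
      · omega
      · exact le_trans (by omega) (pv_cuts_pos l _ h1)
    · rcases List.mem_append.mp h2 with h2 | h2
      · exact le_trans (by omega) (pv_cuts_pos l _ h2)
      · simp only [List.mem_singleton] at h2; omega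

-- non-uppercase head: the head char is prepended to B's first piece
theorem pv_pieces_cons_lower (c : Char) (l : List Char) (hu : pvALPHABET.contains c = false) :
    ∃ p t, pvPieces l = p :: t ∧ pvPieces (c :: l) = (c :: p) :: t := by
  have hn : ((c :: l).length : Int) = (l.length : Int) + 1 := by push_cast [List.length_cons]; ring
  cases hc : pvCuts l with
  | nil =>
    refine ⟨PySem.List.slice l (some 0) (some (l.length : Int)), [], ?_, ?_⟩
    · unfold pvPieces; rw [hc]; rfl
    · unfold pvPieces
      rw [pv_cuts_cons, if_neg (by simpa using hu), hc, hn]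
      simp only [List.map_nil, List.nil_append, List.zip_cons_cons, List.zip_nil_left,
        List.map_cons, List.map_nil]
      rw [pv_slice_zero_succ c l (by omega)]
  | cons k cs =>
    have hkpos : ∀ x ∈ k :: cs, 1 ≤ x := by rw [← hc]; exact pv_cuts_pos l
    refine ⟨PySem.List.slice l (some 0) (some k),
      ((k :: cs).zip (cs ++ [(l.length : Int)])).map
        (fun p => PySem.List.slice l (some p.1) (some p.2)), ?_, ?_⟩
    · unfold pvPieces; rw [hc]; rfl
    · unfold pvPieces
      rw [pv_cuts_cons, if_neg (by simpa using hu), hc, hn]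
      simp only [List.nil_append, List.map_cons, List.cons_append, List.zip_cons_cons, List.map_cons]
      refine List.cons_eq_cons.mpr ⟨?_, ?_⟩
      · exact pv_slice_zero_succ c l (le_trans (by omega) (hkpos k List.mem_cons_self))
      · have e3 : (cs.map (· + 1)) ++ [(l.length : Int) + 1] = (cs ++ [(l.length : Int)]).map (· + 1) := by simp
        have e4 : (k + 1) :: cs.map (· + 1) = (k :: cs).map (· + 1) := by simp
        rw [e3, e4, List.zip_map]
        apply pv_map_slice_shift
        intro p hp
        obtain ⟨h1, h2⟩ := List.of_mem_zip hp
        constructor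
        · exact le_trans (by omega) (hkpos _ h1)
        · rcases List.mem_append.mp h2 with h2 | h2
          · exact le_trans (by omega) (hkpos _ (List.mem_cons_of_mem k h2))
          · simp only [List.mem_singleton] at h2; omega

-- B always produces at least one piece
theorem pv_pieces_ne_nil (l : List Char) : ∃ p t, pvPieces l = p :: t := by
  unfold pvPieces
  cases hc : pvCuts l with
  | nil => exact ⟨_, _, rfl⟩
  | cons k cs => exact ⟨_, _, rfl⟩

-- the heart of the proof: joining B's pieces with spaces is the per-char expansion
theorem pv_join_pieces (l : List Char) :
    PySem.Chars.join [' '] (pvPieces l) = l.flatMap pvF := by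
  induction l with
  | nil =>
    simp [pvPieces, pvCuts, PySem.List.enumerate, PySem.Chars.join, List.intercalate,
      PySem.List.slice_toNat _ le_rfl le_rfl]
  | cons c l ih =>
    cases hu : pvALPHABET.contains c
    · obtain ⟨p, t, hl, hcl⟩ := pv_pieces_cons_lower c l hu
      rw [hcl, pv_join_cons_head, ← hl, ih]
      have hu' : c ∉ pvALPHABET := by simpa using hu
      simp [pvF, hu']
    · obtain ⟨p, t, hpt⟩ := pv_pieces_ne_nil l
      rw [pv_pieces_cons_upper c l hu, hpt, PySem.Chars.join_cons_cons, ← hpt, ih]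
      have hu' : c ∈ pvALPHABET := by simpa using hu
      simp [pvF, hu']

-- ===== VERDICT (by name: the statement is the Claim_ definition above) =====
theorem add_space_spec : Claim_equal_add_space := by
  intro w _
  unfold Spec_add_space add_space add_space_alt
  rw [PySem.List.foldl_pyRange_zero_pyGetD' w.toList ' '
        (fun acc letter => if pvALPHABET.contains letter then acc ++ [letter, ' '] else acc ++ [letter]) []]
  have hA : w.toList.foldl (fun acc letter =>
      if pvALPHABET.contains letter then acc ++ [letter, ' '] else acc ++ [letter]) []
      = [] ++ w.toList.flatMap pvF := by
    rw [← PySem.List.foldl_append_eq_flatMap]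
    congr 1
    funext acc x
    simp only [pvF]
    split_ifs <;> rfl
  rw [hA, List.nil_append, ← pv_join_pieces, pvPieces]
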